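-- pv_equiv track=rewrite | github.com/AxioDL/metaforce | hecl/blender/hecl_blendershell.py | count_brackets
-- ===== SOURCE A (Python) =====
-- def count_brackets(linestr):
--     bracket_count = 0
--     for ch in linestr:
--         if ch in {'[','{','('}:
--             bracket_count += 1
--         elif ch in {']','}',')'}:
--             bracket_count -= 1
--     return bracket_count
-- ===== SOURCE B (Python) =====
-- def count_brackets(linestr):
--     freq = {}
--     for ch in linestr:
--         freq[ch] = freq.get(ch, 0) + 1
--     return (freq.get('[', 0) + freq.get('{', 0) + freq.get('(', 0)
--             - freq.get(']', 0) - freq.get('}', 0) - freq.get(')', 0))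
-- ===== Notes on version B (the rewrite author's own statement) =====
-- stated objective: alternative
-- what changed: Replaces the per-character open/close branching with a frequency table built in one pass followed by six lookups over the bracket alphabet.
import Mathlib
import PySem

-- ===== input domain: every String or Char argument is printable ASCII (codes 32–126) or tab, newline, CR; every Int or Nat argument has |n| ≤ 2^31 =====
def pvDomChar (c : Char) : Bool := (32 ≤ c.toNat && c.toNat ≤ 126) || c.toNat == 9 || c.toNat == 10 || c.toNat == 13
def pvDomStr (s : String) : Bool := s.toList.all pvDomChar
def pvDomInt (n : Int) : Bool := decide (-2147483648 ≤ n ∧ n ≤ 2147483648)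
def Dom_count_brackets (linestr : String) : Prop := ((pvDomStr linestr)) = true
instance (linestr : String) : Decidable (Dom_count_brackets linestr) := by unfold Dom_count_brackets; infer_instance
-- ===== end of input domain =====

-- B replaces the per-character open/close branching with a frequency table built in one pass and six bracket lookups (alternative decomposition, same cost).


-- ===== PORT A =====
def count_brackets (linestr : String) : Int :=
  linestr.toList.foldl
    (fun bracket_count ch =>
      if ch ∈ ['[', '{', '('] then bracket_count + 1
      else if ch ∈ [']', '}', ')'] then bracket_count - 1
      else bracket_count) 0

-- ===== PORT B =====
def count_brackets_alt (linestr : String) : Int :=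
  let freq := linestr.toList.foldl (fun d ch => d.insert ch (d.getD ch 0 + 1))
    (PySem.Dict.empty : PySem.Dict Char Int)
  freq.getD '[' 0 + freq.getD '{' 0 + freq.getD '(' 0
    - freq.getD ']' 0 - freq.getD '}' 0 - freq.getD ')' 0

-- ===== PRECONDITION & SPEC =====
def Spec_count_brackets (linestr : String) (out : Int) : Prop := out = count_brackets_alt linestr
instance (linestr : String) (out : Int) : Decidable (Spec_count_brackets linestr out) := by unfold Spec_count_brackets; infer_instance

-- ===== CLAIM (what is proved, stated in full; the proofs are below) =====
def Claim_equal_count_brackets : Prop := ∀ (linestr : String), Dom_count_brackets linestr → Spec_count_brackets linestr (count_brackets linestr)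

-- ===== LEMMAS AND PROOFS =====
lemma count_brackets_foldl (l : List Char) (acc : Int) :
    l.foldl
      (fun bracket_count ch =>
        if ch ∈ ['[', '{', '('] then bracket_count + 1
        else if ch ∈ [']', '}', ')'] then bracket_count - 1
        else bracket_count) acc
      = acc + (l.count '[' + l.count '{' + l.count '('
          - l.count ']' - l.count '}' - l.count ')') := by
  induction l generalizing acc with
  | nil => simp
  | cons ch t ih =>
    simp only [List.foldl_cons, ih, List.count_cons]
    by_cases h1 : ch ∈ ['[', '{', '(']
    · simp only [List.mem_cons, List.not_mem_nil, or_false] at h1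
      rcases h1 with h | h | h <;> subst h <;> simp <;> ring
    · by_cases h2 : ch ∈ [']', '}', ')']
      · simp only [List.mem_cons, List.not_mem_nil, or_false] at h2
        rcases h2 with h | h | h <;> subst h <;>
          simp_all [List.mem_cons] <;> ring
      · simp only [List.mem_cons, List.not_mem_nil, or_false] at h1 h2
        push Not at h1 h2
        obtain ⟨a1, a2, a3⟩ := h1
        obtain ⟨b1, b2, b3⟩ := h2
        simp [a1, a2, a3, b1, b2, b3]

-- ===== VERDICT (by name: the statement is the Claim_ definition above) =====
theorem count_brackets_spec : Claim_equal_count_brackets := by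
  intro linestr _
  unfold Spec_count_brackets count_brackets count_brackets_alt
  rw [count_brackets_foldl]
  simp only [PySem.Dict.foldl_insert_getD_add_one_eq_counter, PySem.Dict.getD_counter]
  ring
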